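-- pv_equiv track=rewrite | github.com/elcelsius/tradutor_llm | tradutor/sanitizer.py | _collapse_repeated_paragraphs
-- ===== SOURCE A (Python) =====
-- from typing import List, Tuple
--
-- def _collapse_repeated_paragraphs(text: str) -> Tuple[str, int]:
--     paragraphs = [p.strip() for p in text.split("\n\n") if p.strip()]
--     kept: List[str] = []
--     removed = 0
--     prev = None
--     for p in paragraphs:
--         if prev is not None and p == prev:
--             removed += 1
--             continue
--         kept.append(p)
--         prev = p
--     return "\n\n".join(kept), removed
-- ===== SOURCE B (Python) =====
-- from typing import List, Tuple
--
-- def _dedup_dc(ps: List[str]) -> List[str]: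
--     # divide and conquer: collapse each half, then merge at the boundary
--     if len(ps) <= 1:
--         return ps[:]
--     mid = len(ps) // 2
--     left = _dedup_dc(ps[:mid])
--     right = _dedup_dc(ps[mid:])
--     if right[0] == left[-1]:
--         return left + right[1:]
--     return left + right
--
-- def _collapse_repeated_paragraphs(text: str) -> Tuple[str, int]:
--     paragraphs = [p.strip() for p in text.split("\n\n") if p.strip()]
--     kept = _dedup_dc(paragraphs)
--     return "\n\n".join(kept), len(paragraphs) - len(kept)
-- ===== Notes on version B (the rewrite author's own statement) =====
-- stated objective: alternative
-- what changed: Replaces A's stateful prev-tracking linear scan with a divide-and-conquer recursion that collapses each half independently and merges at the boundary, deriving the removed count arithmetically as len(paragraphs) - len(kept).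
import Mathlib
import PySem

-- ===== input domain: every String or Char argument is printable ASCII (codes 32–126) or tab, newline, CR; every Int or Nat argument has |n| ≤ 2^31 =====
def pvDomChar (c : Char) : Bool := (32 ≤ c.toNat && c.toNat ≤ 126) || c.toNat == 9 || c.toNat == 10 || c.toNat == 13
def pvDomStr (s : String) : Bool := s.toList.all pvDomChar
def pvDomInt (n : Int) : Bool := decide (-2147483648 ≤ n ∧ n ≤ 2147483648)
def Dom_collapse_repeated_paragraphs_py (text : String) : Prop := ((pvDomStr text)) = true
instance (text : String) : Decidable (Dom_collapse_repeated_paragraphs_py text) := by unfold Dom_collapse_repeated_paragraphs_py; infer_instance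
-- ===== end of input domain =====

-- B replaces A's stateful prev-tracking scan with a divide-and-conquer recursion (halve, collapse, merge at the boundary); removed count is derived arithmetically (alternative; same result, not faster).


-- ===== PORT A =====
def pvStepA (st : List String × Int × Option String) (p : String) : List String × Int × Option String :=
  if st.2.2 = some p then (st.1, st.2.1 + 1, st.2.2)
  else (st.1 ++ [p], st.2.1, some p)

def collapse_repeated_paragraphs_py (text : String) : String × Int :=
  let paragraphs := (((PySem.Str.split? text "\n\n").getD []).filter
      (fun p => PySem.Str.strip p ≠ "")).map PySem.Str.strip
  let st := paragraphs.foldl pvStepA ([], 0, none)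
  (PySem.Str.join "\n\n" st.1, st.2.1)

-- ===== PORT B =====
-- divide and conquer: collapse each half, merge at the boundary (right[0] / left[-1] via head?/getLast?)
def pvDedupDC (ps : List String) : List String :=
  if _h : ps.length ≤ 1 then ps
  else
    let mid := ps.length / 2
    let left := pvDedupDC (ps.take mid)
    let right := pvDedupDC (ps.drop mid)
    match right.head?, left.getLast? with
    | some b, some a => if b == a then left ++ right.tail else left ++ right
    | _, _ => left ++ right
termination_by ps.length
decreasing_by
  · simp only [List.length_take]; omega
  · simp only [List.length_drop]; omega

def collapse_repeated_paragraphs_py_alt (text : String) : String × Int :=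
  let paragraphs := (((PySem.Str.split? text "\n\n").getD []).filter
      (fun p => PySem.Str.strip p ≠ "")).map PySem.Str.strip
  let kept := pvDedupDC paragraphs
  (PySem.Str.join "\n\n" kept, (paragraphs.length : Int) - (kept.length : Int))

-- ===== PRECONDITION & SPEC =====
def Spec_collapse_repeated_paragraphs_py (text : String) (out : String × Int) : Prop := out = collapse_repeated_paragraphs_py_alt text
instance (text : String) (out : String × Int) : Decidable (Spec_collapse_repeated_paragraphs_py text out) := by unfold Spec_collapse_repeated_paragraphs_py; infer_instance

-- ===== CLAIM (what is proved, stated in full; the proofs are below) =====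
def Claim_equal_collapse_repeated_paragraphs_py : Prop := ∀ (text : String), Dom_collapse_repeated_paragraphs_py text → Spec_collapse_repeated_paragraphs_py text (collapse_repeated_paragraphs_py text)

-- ===== LEMMAS AND PROOFS =====

-- reference shape both ports are reduced to: consecutive dedup carrying the previous kept element
def pvDedupFrom (prev : String) : List String → List String
  | [] => []
  | p :: t => if p == prev then pvDedupFrom prev t else p :: pvDedupFrom p t

def pvDedup : List String → List String
  | [] => []
  | x :: t => x :: pvDedupFrom x t

lemma pvDedupFrom_append (l r : List String) : ∀ x,
    pvDedupFrom x (l ++ r) = pvDedupFrom x l ++ pvDedupFrom (l.getLastD x) r := by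
  induction l with
  | nil => intro x; simp [pvDedupFrom]
  | cons p t ih =>
    intro x
    simp only [List.cons_append, pvDedupFrom, List.getLastD_cons]
    by_cases h : p == x
    · have : p = x := by simpa using h
      subst this
      simp [ih]
    · simp [h, ih]

lemma pvGetLast?_cons (a : String) (l : List String) :
    (a :: l).getLast? = some (l.getLastD a) := by
  induction l generalizing a with
  | nil => rfl
  | cons b t ih => rw [List.getLast?_cons_cons, ih, List.getLastD_cons]

lemma pvDedupFrom_getLastD (l : List String) : ∀ x,
    (pvDedupFrom x l).getLastD x = l.getLastD x := by
  induction l with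
  | nil => intro x; simp [pvDedupFrom]
  | cons p t ih =>
    intro x
    by_cases h : (p == x) = true
    · have hp : p = x := by simpa using h
      subst hp
      simp only [pvDedupFrom, if_pos h, List.getLastD_cons]
      exact ih p
    · simp only [pvDedupFrom, if_neg h, List.getLastD_cons]
      exact ih p

-- A-side loop invariant
lemma pvLoopA (ps : List String) : ∀ (kept : List String) (removed : Int) (x : String),
    (ps.foldl pvStepA (kept, removed, some x)).1 = kept ++ pvDedupFrom x ps ∧
    (ps.foldl pvStepA (kept, removed, some x)).2.1
      = removed + ((ps.length : Int) - ((pvDedupFrom x ps).length : Int)) := by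
  induction ps with
  | nil => intro kept removed x; simp [pvDedupFrom]
  | cons p t ih =>
    intro kept removed x
    rw [List.foldl_cons]
    by_cases h : p = x
    · subst h
      have hs : pvStepA (kept, removed, some p) p = (kept, removed + 1, some p) := by
        simp [pvStepA]
      rw [hs]
      obtain ⟨h1, h2⟩ := ih kept (removed + 1) p
      have hpp : (p == p) = true := by simp
      refine ⟨by rw [h1]; simp only [pvDedupFrom, if_pos hpp], ?_⟩
      rw [h2]; simp only [pvDedupFrom, if_pos hpp, List.length_cons]
      push_cast; ring
    · have hs : pvStepA (kept, removed, some x) p = (kept ++ [p], removed, some p) := by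
        simp [pvStepA, (Ne.symm h : x ≠ p)]
      rw [hs]
      obtain ⟨h1, h2⟩ := ih (kept ++ [p]) removed p
      have hne : ¬ ((p == x) = true) := by simp [h]
      refine ⟨by rw [h1]; simp only [pvDedupFrom, if_neg hne, List.append_assoc, List.singleton_append], ?_⟩
      rw [h2]; simp only [pvDedupFrom, if_neg hne, List.length_cons]
      push_cast; ring

lemma pvLoopA_top (ps : List String) :
    (ps.foldl pvStepA ([], 0, none)).1 = pvDedup ps ∧
    (ps.foldl pvStepA ([], 0, none)).2.1 = (ps.length : Int) - ((pvDedup ps).length : Int) := by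
  cases ps with
  | nil => simp [pvDedup]
  | cons p t =>
    rw [List.foldl_cons]
    have hs : pvStepA ([], 0, none) p = ([p], 0, some p) := by simp [pvStepA]
    rw [hs]
    obtain ⟨h1, h2⟩ := pvLoopA t [p] 0 p
    refine ⟨by simpa [pvDedup] using h1, ?_⟩
    rw [h2]; simp only [pvDedup, List.length_cons]; push_cast; ring

-- pvDedup of a nonempty list is nonempty, with known head and last
lemma pvDedup_cons (x : String) (t : List String) :
    pvDedup (x :: t) = x :: pvDedupFrom x t := rfl

-- unfolding equation for pvDedupDC on a list of length ≥ 2, with the lets spelled out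
lemma pvDedupDC_unfold (ps : List String) (h : ¬ ps.length ≤ 1) :
    pvDedupDC ps =
      match (pvDedupDC (ps.drop (ps.length / 2))).head?,
            (pvDedupDC (ps.take (ps.length / 2))).getLast? with
      | some b, some a =>
          if b == a then
            pvDedupDC (ps.take (ps.length / 2)) ++ (pvDedupDC (ps.drop (ps.length / 2))).tail
          else pvDedupDC (ps.take (ps.length / 2)) ++ pvDedupDC (ps.drop (ps.length / 2))
      | _, _ => pvDedupDC (ps.take (ps.length / 2)) ++ pvDedupDC (ps.drop (ps.length / 2)) := by
  rw [pvDedupDC, dif_neg h]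

-- B-side: the divide-and-conquer recursion computes pvDedup
lemma pvDedupDC_eq (ps : List String) : pvDedupDC ps = pvDedup ps := by
  induction h : ps.length using Nat.strong_induction_on generalizing ps with
  | _ n ih =>
    subst h
    by_cases hle : ps.length ≤ 1
    · rw [pvDedupDC, dif_pos hle]
      match ps, hle with
      | [], _ => rfl
      | [x], _ => simp [pvDedup, pvDedupFrom]
    · rw [pvDedupDC_unfold ps hle]
      have h2 : 2 ≤ ps.length := by omega
      set mid := ps.length / 2 with hmid
      have hmid1 : 1 ≤ mid := by omega
      have hmidlt : mid < ps.length := by omega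
      have hlenT : (ps.take mid).length = mid := by simp; omega
      have hlenD : (ps.drop mid).length = ps.length - mid := by simp
      rw [ih _ (by simp only [List.length_drop]; omega) _ rfl,
        ih _ (by simp only [List.length_take]; omega) _ rfl]
      -- both halves nonempty
      obtain ⟨a, lt, hl⟩ : ∃ a lt, ps.take mid = a :: lt := by
        cases hT : ps.take mid with
        | nil => exfalso; rw [hT] at hlenT; simp at hlenT; omega
        | cons a lt => exact ⟨a, lt, rfl⟩
      obtain ⟨b, rt, hr⟩ : ∃ b rt, ps.drop mid = b :: rt := by
        cases hD : ps.drop mid with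
        | nil => exfalso; rw [hD] at hlenD; simp at hlenD; omega
        | cons b rt => exact ⟨b, rt, rfl⟩
      have hps : ps = (a :: lt) ++ (b :: rt) := by rw [← hl, ← hr, List.take_append_drop]
      conv_rhs => rw [hps]
      rw [hl, hr, pvDedup_cons, pvDedup_cons]
      have hlast : (a :: pvDedupFrom a lt).getLast? = some (lt.getLastD a) := by
        rw [pvGetLast?_cons, pvDedupFrom_getLastD]
      have hrhs : pvDedup ((a :: lt) ++ (b :: rt))
          = a :: (pvDedupFrom a lt ++ pvDedupFrom (lt.getLastD a) (b :: rt)) := by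
        rw [List.cons_append, pvDedup_cons, pvDedupFrom_append]
      rw [hrhs]
      simp only [List.head?_cons, hlast]
      by_cases hba : (b == lt.getLastD a) = true
      · have hb : b = lt.getLastD a := by simpa using hba
        simp only [List.tail_cons, pvDedupFrom, if_pos hba]
        rw [← hb, List.cons_append]
      · simp only [if_neg hba, pvDedupFrom]
        rw [List.cons_append]

-- ===== VERDICT (by name: the statement is the Claim_ definition above) =====
theorem collapse_repeated_paragraphs_py_spec : Claim_equal_collapse_repeated_paragraphs_py := by
  intro text _
  unfold Spec_collapse_repeated_paragraphs_py
  simp only [collapse_repeated_paragraphs_py, collapse_repeated_paragraphs_py_alt]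
  obtain ⟨h1, h2⟩ := pvLoopA_top
    ((((PySem.Str.split? text "\n\n").getD []).filter (fun p => PySem.Str.strip p ≠ "")).map PySem.Str.strip)
  rw [h1, h2, pvDedupDC_eq]
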